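-- pv_equiv track=rewrite | github.com/B-A-M-N/vibeflow | scripts/capability-registry.py | tool_available
-- ===== SOURCE A (Python) =====
-- BUILTIN_TOOL_SOURCE = "vibe/core/tools/builtins/"
--
-- MIDDLEWARE_SOURCE = "vibe/core/middleware.py"
--
-- def build_registry():
--     registry = {
--         "tools": {
--             "bash": {"source": BUILTIN_TOOL_SOURCE, "class": "Bash", "available": True, "aliases": ["Bash"]},
--             "read_file": {"source": BUILTIN_TOOL_SOURCE, "class": "ReadFile", "available": True, "aliases": ["ReadFile"]},
--             "write_file": {"source": BUILTIN_TOOL_SOURCE, "class": "WriteFile", "available": True, "aliases": ["WriteFile"]},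
--             "edit": {"source": BUILTIN_TOOL_SOURCE, "class": "EditFile", "available": True, "aliases": ["Edit", "EditFile"]},
--             "grep": {"source": BUILTIN_TOOL_SOURCE, "class": "Grep", "available": True, "aliases": ["Grep"]},
--             "search_replace": {"source": BUILTIN_TOOL_SOURCE, "class": "SearchReplace", "available": True, "aliases": ["SearchReplace"]},
--             "glob": {"source": BUILTIN_TOOL_SOURCE, "class": "Glob", "available": True, "aliases": ["Glob"]},
--             "lsp": {"source": BUILTIN_TOOL_SOURCE, "class": "LSP", "available": True, "aliases": ["LSP"]},
--             "webfetch": {"source": BUILTIN_TOOL_SOURCE, "class": "WebFetch", "available": True, "aliases": ["WebFetch", "web_fetch"]},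
--             "websearch": {"source": BUILTIN_TOOL_SOURCE, "class": "WebSearch", "available": True, "aliases": ["WebSearch", "web_search"]},
--             "ask_user_question": {"source": BUILTIN_TOOL_SOURCE, "class": "AskUserQuestion", "available": True, "aliases": ["ask_user_question", "AskUserQuestion"]},
--             "exit_plan_mode": {"source": BUILTIN_TOOL_SOURCE, "class": "ExitPlanMode", "available": True, "aliases": ["exit_plan_mode", "ExitPlanMode"]},
--             "todo": {"source": BUILTIN_TOOL_SOURCE, "class": "Todo", "available": True, "aliases": ["todo", "Todo"]},
--             "task": {"source": BUILTIN_TOOL_SOURCE, "class": "Task", "available": True, "aliases": ["task", "Task"]},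
--         },
--         "middleware": {
--             "TurnLimitMiddleware": {"interface": MIDDLEWARE_SOURCE, "hooks": ["before_turn"]},
--             "PriceLimitMiddleware": {"interface": MIDDLEWARE_SOURCE, "hooks": ["before_turn"]},
--             "AutoCompactMiddleware": {"interface": MIDDLEWARE_SOURCE, "hooks": ["before_turn"]},
--             "ReadOnlyAgentMiddleware": {"interface": MIDDLEWARE_SOURCE, "hooks": ["before_turn"]},
--             "ContextWarningMiddleware": {"interface": MIDDLEWARE_SOURCE, "hooks": ["before_turn"]},
--         },
--         # NOT built-in. Require Tier D source changes: registration in _setup_middleware() in AgentLoop.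
--         # Listed as reference examples only — not available without source modification.
--         "custom_middleware_examples": {
--             "workflow_phase_guard": {"interface": MIDDLEWARE_SOURCE, "hooks": ["before_turn"], "tier": "D", "requires_source_registration": True},
--             "no_user_deferral_guard": {"interface": MIDDLEWARE_SOURCE, "hooks": ["before_turn"], "tier": "D", "requires_source_registration": True},
--         },
--         "skills": {
--             "vibe-workflow-init": {"path": "skills/vibe-workflow-init/", "trigger": "init workflow"},
--             "vibe-workflow-design": {"path": "skills/vibe-workflow-design/", "trigger": "design workflow"},
--             "vibe-workflow-plan": {"path": "skills/vibe-workflow-plan/", "trigger": "plan workflow"},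
--             "vibe-workflow-apply": {"path": "skills/vibe-workflow-apply/", "trigger": "apply workflow"},
--             "vibe-workflow-validate": {"path": "skills/vibe-workflow-validate/", "trigger": "validate workflow"},
--             "vibe-workflow-inspect": {"path": "skills/vibe-workflow-inspect/", "trigger": "inspect workflow"},
--             "vibe-workflow-update": {"path": "skills/vibe-workflow-update/", "trigger": "update workflow"},
--             "vibe-workflow-realize": {"path": "skills/vibe-workflow-realize/", "trigger": "realize existing workflow"},
--         },
--         "models": ["mistral-large", "mistral-medium", "mixtral-8x22b"],
--         "commands": ["vibe", "vibe-acp", "vibe --resume"],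
--         "permissions": ["read", "write", "execute", "network"]
--     }
--     return registry
--
-- def tool_available(name):
--     normalized = str(name).strip()
--     registry = build_registry()["tools"]
--     if normalized in registry:
--         return registry[normalized].get("available", False)
--     lowered = normalized.lower()
--     for tool_name, spec in registry.items():
--         aliases = {alias.lower() for alias in spec.get("aliases", [])}
--         if lowered == tool_name.lower() or lowered in aliases:
--             return spec.get("available", False)
--     return False
-- ===== SOURCE B (Python) =====
-- # Precomputed flat membership set: every lowercased token (tool name or alias)
-- # from the registry's "tools" section; all tools are available=True, so
-- # availability is exactly membership of the stripped, lowercased name.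
-- _AVAILABLE_TOKENS = frozenset({
--     "bash",
--     "read_file", "readfile",
--     "write_file", "writefile",
--     "edit", "editfile",
--     "grep",
--     "search_replace", "searchreplace",
--     "glob",
--     "lsp",
--     "webfetch", "web_fetch",
--     "websearch", "web_search",
--     "ask_user_question", "askuserquestion",
--     "exit_plan_mode", "exitplanmode",
--     "todo",
--     "task",
-- })
--
-- def tool_available(name):
--     return str(name).strip().lower() in _AVAILABLE_TOKENS
-- ===== Notes on version B (the rewrite author's own statement) =====
-- stated objective: simpler
-- what changed: Replaces A's per-call registry construction plus two-phase lookup (case-sensitive dict hit, then a linear scan building a per-entry lowercased alias set) by one module-level frozenset of all lowercased tokens and a single membership test; correct because registry keys are already lowercase and every tool is available=True.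
import Mathlib
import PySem

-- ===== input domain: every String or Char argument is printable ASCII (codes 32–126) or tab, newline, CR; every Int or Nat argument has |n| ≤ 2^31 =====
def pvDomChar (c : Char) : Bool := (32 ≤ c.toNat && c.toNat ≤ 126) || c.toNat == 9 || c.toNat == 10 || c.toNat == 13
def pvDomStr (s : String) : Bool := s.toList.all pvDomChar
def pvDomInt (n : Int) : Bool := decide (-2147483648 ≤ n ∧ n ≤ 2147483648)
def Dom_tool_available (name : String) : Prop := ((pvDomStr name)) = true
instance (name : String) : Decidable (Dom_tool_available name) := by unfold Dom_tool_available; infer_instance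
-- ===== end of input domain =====

-- B replaces A's per-call registry build plus exact-match-then-alias-scan lookup by one precomputed
-- frozenset of all lowercased tokens and a single membership test (simpler; valid because the
-- registry keys are lowercase and every tool is available=True).

-- ===== PORT A =====
structure ToolSpec where
  source : String
  cls : String
  available : Bool
  aliases : List String
deriving DecidableEq, Repr

def BUILTIN_TOOL_SOURCE : String := "vibe/core/tools/builtins/"

-- the "tools" section of build_registry() (the only part tool_available reads)
def toolsRegistry : PySem.Dict String ToolSpec := PySem.Dict.ofList [
  ("bash", ⟨BUILTIN_TOOL_SOURCE, "Bash", true, ["Bash"]⟩),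
  ("read_file", ⟨BUILTIN_TOOL_SOURCE, "ReadFile", true, ["ReadFile"]⟩),
  ("write_file", ⟨BUILTIN_TOOL_SOURCE, "WriteFile", true, ["WriteFile"]⟩),
  ("edit", ⟨BUILTIN_TOOL_SOURCE, "EditFile", true, ["Edit", "EditFile"]⟩),
  ("grep", ⟨BUILTIN_TOOL_SOURCE, "Grep", true, ["Grep"]⟩),
  ("search_replace", ⟨BUILTIN_TOOL_SOURCE, "SearchReplace", true, ["SearchReplace"]⟩),
  ("glob", ⟨BUILTIN_TOOL_SOURCE, "Glob", true, ["Glob"]⟩),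
  ("lsp", ⟨BUILTIN_TOOL_SOURCE, "LSP", true, ["LSP"]⟩),
  ("webfetch", ⟨BUILTIN_TOOL_SOURCE, "WebFetch", true, ["WebFetch", "web_fetch"]⟩),
  ("websearch", ⟨BUILTIN_TOOL_SOURCE, "WebSearch", true, ["WebSearch", "web_search"]⟩),
  ("ask_user_question", ⟨BUILTIN_TOOL_SOURCE, "AskUserQuestion", true, ["ask_user_question", "AskUserQuestion"]⟩),
  ("exit_plan_mode", ⟨BUILTIN_TOOL_SOURCE, "ExitPlanMode", true, ["exit_plan_mode", "ExitPlanMode"]⟩),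
  ("todo", ⟨BUILTIN_TOOL_SOURCE, "Todo", true, ["todo", "Todo"]⟩),
  ("task", ⟨BUILTIN_TOOL_SOURCE, "Task", true, ["task", "Task"]⟩)]

-- the 'for tool_name, spec in registry.items(): …' loop of A (early return on a hit)
def scanTools (lowered : String) : List (String × ToolSpec) → Bool
  | [] => false
  | (toolName, spec) :: rest =>
    let aliases : PySem.Set String := PySem.Set.ofList (spec.aliases.map PySem.Str.lower)
    if lowered == PySem.Str.lower toolName || PySem.Set.contains aliases lowered then
      spec.available
    else scanTools lowered rest

def tool_available (name : String) : Bool :=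
  let normalized := PySem.Str.strip name
  let registry := toolsRegistry
  match registry.get? normalized with
  | some spec => spec.available
  | none =>
    let lowered := PySem.Str.lower normalized
    scanTools lowered registry.items

-- ===== PORT B =====
-- Source B's module-level _AVAILABLE_TOKENS frozenset literal
def availableTokens : PySem.Set String := PySem.Set.ofList [
  "bash",
  "read_file", "readfile",
  "write_file", "writefile",
  "edit", "editfile",
  "grep",
  "search_replace", "searchreplace",
  "glob",
  "lsp",
  "webfetch", "web_fetch",
  "websearch", "web_search",
  "ask_user_question", "askuserquestion",
  "exit_plan_mode", "exitplanmode",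
  "todo",
  "task"]

def tool_available_alt (name : String) : Bool :=
  PySem.Set.contains availableTokens (PySem.Str.lower (PySem.Str.strip name))

-- ===== PRECONDITION & SPEC =====
def Spec_tool_available (name : String) (out : Bool) : Prop := out = tool_available_alt name
instance (name : String) (out : Bool) : Decidable (Spec_tool_available name out) := by unfold Spec_tool_available; infer_instance

-- ===== CLAIM (what is proved, stated in full; the proofs are below) =====
def Claim_equal_tool_available : Prop := ∀ (name : String), Dom_tool_available name → Spec_tool_available name (tool_available name)

-- ===== LEMMAS AND PROOFS =====

-- the registry's items, written out (defeq to toolsRegistry.items)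
def itemsLit : List (String × ToolSpec) := [
  ("bash", ⟨BUILTIN_TOOL_SOURCE, "Bash", true, ["Bash"]⟩),
  ("read_file", ⟨BUILTIN_TOOL_SOURCE, "ReadFile", true, ["ReadFile"]⟩),
  ("write_file", ⟨BUILTIN_TOOL_SOURCE, "WriteFile", true, ["WriteFile"]⟩),
  ("edit", ⟨BUILTIN_TOOL_SOURCE, "EditFile", true, ["Edit", "EditFile"]⟩),
  ("grep", ⟨BUILTIN_TOOL_SOURCE, "Grep", true, ["Grep"]⟩),
  ("search_replace", ⟨BUILTIN_TOOL_SOURCE, "SearchReplace", true, ["SearchReplace"]⟩),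
  ("glob", ⟨BUILTIN_TOOL_SOURCE, "Glob", true, ["Glob"]⟩),
  ("lsp", ⟨BUILTIN_TOOL_SOURCE, "LSP", true, ["LSP"]⟩),
  ("webfetch", ⟨BUILTIN_TOOL_SOURCE, "WebFetch", true, ["WebFetch", "web_fetch"]⟩),
  ("websearch", ⟨BUILTIN_TOOL_SOURCE, "WebSearch", true, ["WebSearch", "web_search"]⟩),
  ("ask_user_question", ⟨BUILTIN_TOOL_SOURCE, "AskUserQuestion", true, ["ask_user_question", "AskUserQuestion"]⟩),
  ("exit_plan_mode", ⟨BUILTIN_TOOL_SOURCE, "ExitPlanMode", true, ["exit_plan_mode", "ExitPlanMode"]⟩),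
  ("todo", ⟨BUILTIN_TOOL_SOURCE, "Todo", true, ["todo", "Todo"]⟩),
  ("task", ⟨BUILTIN_TOOL_SOURCE, "Task", true, ["task", "Task"]⟩)]

-- the distinct elements of B's token set, as a plain list
def tokensLit : List String := [
  "bash", "read_file", "readfile", "write_file", "writefile", "edit", "editfile",
  "grep", "search_replace", "searchreplace", "glob", "lsp", "webfetch", "web_fetch",
  "websearch", "web_search", "ask_user_question", "askuserquestion",
  "exit_plan_mode", "exitplanmode", "todo", "task"]

set_option maxRecDepth 16384 in
theorem A_eq (s : String) : tool_available s =
    (match (PySem.Dict.mk itemsLit).get? (PySem.Str.strip s) with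
     | some spec => spec.available
     | none => scanTools (PySem.Str.lower (PySem.Str.strip s)) itemsLit) := rfl

set_option maxRecDepth 16384 in
theorem B_eq (s : String) :
    tool_available_alt s = decide (PySem.Str.lower (PySem.Str.strip s) ∈ tokensLit) := by
  have : availableTokens = PySem.Set.ofList tokensLit := by decide
  simp [tool_available_alt, this, PySem.Set.contains, PySem.Set.mem_ofList]

-- generic: A's scan over all-available entries tests membership in the flattened lowered tokens
theorem scan_eq_mem (l : String) (es : List (String × ToolSpec))
    (h : ∀ e ∈ es, e.2.available = true) :
    scanTools l es =
      decide (l ∈ es.flatMap (fun p => PySem.Str.lower p.1 :: p.2.aliases.map PySem.Str.lower)) := by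
  induction es with
  | nil => simp [scanTools]
  | cons e rest ih =>
    obtain ⟨k, spec⟩ := e
    have havail : spec.available = true := h (k, spec) (by simp)
    have hrest : ∀ e ∈ rest, e.2.available = true := fun e he => h e (List.mem_cons_of_mem _ he)
    by_cases h1 : l = PySem.Str.lower k
    · simp [scanTools, h1, havail]
    · by_cases h2 : l ∈ spec.aliases.map PySem.Str.lower
      · simp [scanTools, PySem.Set.contains, PySem.Set.mem_ofList, h1, h2, havail]
      · simp [scanTools, PySem.Set.contains, PySem.Set.mem_ofList, h1, h2, ih hrest]

set_option maxRecDepth 16384 in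
theorem tool_available_eq_alt (name : String) : tool_available name = tool_available_alt name := by
  rw [A_eq, B_eq]
  generalize PySem.Str.strip name = n
  cases h : (PySem.Dict.mk itemsLit).get? n with
  | none =>
    generalize PySem.Str.lower n = l
    rw [scan_eq_mem l itemsLit (by decide)]
    have hded : PySem.List.dedup (itemsLit.flatMap
        (fun p => PySem.Str.lower p.1 :: p.2.aliases.map PySem.Str.lower)) = tokensLit := by
      decide
    refine decide_eq_decide.mpr ?_
    rw [← hded]
    exact (PySem.List.mem_dedup _ _).symm
  | some spec =>
    have hmem : (n, spec) ∈ itemsLit := PySem.Dict.mem_items_of_get?_eq_some _ h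
    simp only [itemsLit, List.mem_cons, List.not_mem_nil, or_false, Prod.mk.injEq] at hmem
    rcases hmem with ⟨rfl, rfl⟩|⟨rfl, rfl⟩|⟨rfl, rfl⟩|⟨rfl, rfl⟩|⟨rfl, rfl⟩|⟨rfl, rfl⟩|⟨rfl, rfl⟩|⟨rfl, rfl⟩|⟨rfl, rfl⟩|⟨rfl, rfl⟩|⟨rfl, rfl⟩|⟨rfl, rfl⟩|⟨rfl, rfl⟩|⟨rfl, rfl⟩ <;> decide

-- ===== VERDICT (by name: the statement is the Claim_ definition above) =====
theorem tool_available_spec : Claim_equal_tool_available := by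
  intro name _
  unfold Spec_tool_available
  exact tool_available_eq_alt name
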